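-- pv_equiv track=rewrite | github.com/AntonBrekke/Master-UiO | 1.semester/possible_set.py | f
-- ===== SOURCE A (Python) =====
-- a = [1,2,3,4,5,6]
--
-- def f(s):
--     l = []
--     for j in range(s):
--         for n in a:
--             for m in a:
--                 if n != m and [n,m] not in l and [m,n] not in l:
--                     l.append([n,m])
--
--     return l
-- ===== SOURCE B (Python) =====
-- a = [1,2,3,4,5,6]
--
-- def f(s):
--     if s <= 0:
--         return []
--     return [[a[i], a[j]] for i in range(len(a)) for j in range(i + 1, len(a))]
-- ===== Notes on version B (the rewrite author's own statement) =====
-- stated objective: simpler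
-- what changed: Replaces A's s repeated full-cross-product passes with linear membership dedup by a single upper-triangle index enumeration (i<j) behind an 's <= 0' guard, producing the pairs directly with no membership tests.
import Mathlib
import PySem

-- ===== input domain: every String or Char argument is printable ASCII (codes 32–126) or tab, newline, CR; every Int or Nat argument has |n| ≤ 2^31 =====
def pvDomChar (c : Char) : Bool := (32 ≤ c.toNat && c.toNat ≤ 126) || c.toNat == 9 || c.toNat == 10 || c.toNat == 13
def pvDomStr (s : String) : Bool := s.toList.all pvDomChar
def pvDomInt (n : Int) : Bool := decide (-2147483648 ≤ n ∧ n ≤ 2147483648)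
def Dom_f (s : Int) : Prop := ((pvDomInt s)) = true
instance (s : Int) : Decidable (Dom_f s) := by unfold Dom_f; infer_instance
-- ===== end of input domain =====

-- B replaces A's repeated dedup-by-membership passes with a single upper-triangle
-- index enumeration (objective: simpler; same return value).

-- the module-level constant `a`
def aList : List Int := [1, 2, 3, 4, 5, 6]

-- ===== PORT A =====
-- one pass of A's body: for n in a: for m in a: if … : l.append([n,m])
def fStep (l : List (List Int)) : List (List Int) :=
  aList.foldl (fun l n =>
    aList.foldl (fun l m =>
      if n ≠ m ∧ [n, m] ∉ l ∧ [m, n] ∉ l then l ++ [[n, m]] else l) l) l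

def f (s : Int) : List (List Int) :=
  (PySem.List.pyRange 0 s 1).foldl (fun l _ => fStep l) []

-- ===== PORT B =====
def f_alt (s : Int) : List (List Int) :=
  if s ≤ 0 then []
  else
    (PySem.List.pyRange 0 (aList.length : Int) 1).flatMap (fun i =>
      (PySem.List.pyRange (i + 1) (aList.length : Int) 1).map (fun j =>
        [PySem.List.pyGetD aList i 0, PySem.List.pyGetD aList j 0]))

-- ===== PRECONDITION & SPEC =====
def Spec_f (s : Int) (out : List (List Int)) : Prop := out = f_alt s
instance (s : Int) (out : List (List Int)) : Decidable (Spec_f s out) := by unfold Spec_f; infer_instance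

-- ===== CLAIM (what is proved, stated in full; the proofs are below) =====
def Claim_equal_f : Prop := ∀ (s : Int), Dom_f s → Spec_f s (f s)

-- ===== LEMMAS AND PROOFS =====

set_option maxRecDepth 4000

-- the full pair list, L
def pairsL : List (List Int) :=
  [[1,2],[1,3],[1,4],[1,5],[1,6],[2,3],[2,4],[2,5],[2,6],[3,4],[3,5],[3,6],[4,5],[4,6],[5,6]]

theorem fStep_nil : fStep [] = pairsL := by decide

theorem fStep_fixed : fStep pairsL = pairsL := by decide

theorem foldl_fStep_fixed (xs : List Int) :
    xs.foldl (fun l _ => fStep l) pairsL = pairsL := by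
  induction xs with
  | nil => rfl
  | cons x xs ih => simpa [List.foldl, fStep_fixed] using ih

theorem f_alt_pos (s : Int) (h : ¬ s ≤ 0) : f_alt s = pairsL := by
  rw [f_alt, if_neg h]; decide

-- ===== VERDICT (by name: the statement is the Claim_ definition above) =====
theorem f_spec : Claim_equal_f := by
  intro s _
  unfold Spec_f f
  by_cases h : s ≤ 0
  · rw [PySem.List.pyRange_one_eq_nil h, f_alt, if_pos h]; rfl
  · rw [PySem.List.pyRange_one_cons (by omega : (0:Int) < s), List.foldl_cons,
      fStep_nil, foldl_fStep_fixed, f_alt_pos s h]
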